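-- pv_equiv track=rewrite | github.com/rtviii/riboxyz | ribctl/lib/__libseq.py | highlight_indices
-- ===== SOURCE A (Python) =====
-- from typing import List, Dict, Tuple, Optional
--
-- def highlight_indices(sequence: str, ixs: List[int], color: int = 91) -> str:
--     """Optimized highlighting using a single join operation"""
--     highlighted = []
--     for i, v in enumerate(sequence):
--         if i in ixs:
--             highlighted.append(f"\033[{color}m{v}\033[0m")
--         else:
--             highlighted.append(v)
--     return ''.join(highlighted)
-- ===== SOURCE B (Python) =====
-- def highlight_indices(sequence: str, ixs, color: int = 91) -> str:
--     """Sort-then-slice: visit only the highlighted positions, copying plain gaps as slices."""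
--     n = len(sequence)
--     targets = sorted({i for i in ixs if 0 <= i < n})
--     parts = []
--     prev = 0
--     for t in targets:
--         parts.append(sequence[prev:t])
--         parts.append(f"\033[{color}m{sequence[t]}\033[0m")
--         prev = t + 1
--     parts.append(sequence[prev:])
--     return ''.join(parts)
-- ===== Notes on version B (the rewrite author's own statement) =====
-- stated objective: faster
-- what changed: Replaces the per-character 'i in ixs' list scan with a precomputed sorted set of valid targets and a cursor walk that copies plain gaps as whole slices.
import Mathlib
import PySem

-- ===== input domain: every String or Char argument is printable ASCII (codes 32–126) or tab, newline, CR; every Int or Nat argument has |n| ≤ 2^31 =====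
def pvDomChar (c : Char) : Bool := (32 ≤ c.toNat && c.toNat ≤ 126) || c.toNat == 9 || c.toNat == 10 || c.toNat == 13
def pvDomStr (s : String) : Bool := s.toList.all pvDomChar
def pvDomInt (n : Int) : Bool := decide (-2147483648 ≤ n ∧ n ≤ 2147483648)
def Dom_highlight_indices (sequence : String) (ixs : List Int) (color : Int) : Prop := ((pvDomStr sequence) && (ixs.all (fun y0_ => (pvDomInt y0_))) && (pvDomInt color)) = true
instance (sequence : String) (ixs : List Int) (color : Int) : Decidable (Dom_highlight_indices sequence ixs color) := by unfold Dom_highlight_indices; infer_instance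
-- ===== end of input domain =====

-- B replaces A's per-character membership scan over ixs by a sorted set of valid
-- target indices and a cursor walk appending whole plain slices between targets.

-- shared formatting helper: the characters of f"\033[{color}m{c}\033[0m"
def hlPiece (color : Int) (c : Char) : List Char :=
  ['\x1b', '['] ++ PySem.Int.toChars color ++ ['m', c, '\x1b', '[', '0', 'm']

-- ===== PORT A =====
def highlight_indices (sequence : String) (ixs : List Int) (color : Int) : String :=
  let highlighted := (PySem.List.enumerate sequence.toList 0).foldl
      (fun acc iv => if iv.1 ∈ ixs then acc ++ [hlPiece color iv.2] else acc ++ [[iv.2]]) []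
  String.ofList highlighted.flatten

-- ===== PORT B =====
-- targets = sorted({i for i in ixs if 0 <= i < n})
def validTargets (n : Int) (ixs : List Int) : List Int :=
  PySem.List.sorted
    (PySem.Set.ofList (ixs.filter (fun i => decide (0 ≤ i) && decide (i < n))))
    (fun x => x) false

def highlight_indices_alt (sequence : String) (ixs : List Int) (color : Int) : String :=
  let cs := sequence.toList
  let targets := validTargets (PySem.List.len cs) ixs
  let st := targets.foldl
      (fun (st : List (List Char) × Int) t =>
        (st.1 ++ [PySem.List.slice cs (some st.2) (some t),
                  hlPiece color (PySem.List.pyGetD cs t ' ')], t + 1))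
      ([], 0)
  String.ofList ((st.1 ++ [PySem.List.slice cs (some st.2) none]).flatten)

-- ===== PRECONDITION & SPEC =====
def Spec_highlight_indices (sequence : String) (ixs : List Int) (color : Int) (out : String) : Prop := out = highlight_indices_alt sequence ixs color
instance (sequence : String) (ixs : List Int) (color : Int) (out : String) : Decidable (Spec_highlight_indices sequence ixs color out) := by unfold Spec_highlight_indices; infer_instance

-- ===== CLAIM (what is proved, stated in full; the proofs are below) =====
def Claim_equal_highlight_indices : Prop := ∀ (sequence : String) (ixs : List Int) (color : Int), Dom_highlight_indices sequence ixs color → Spec_highlight_indices sequence ixs color (highlight_indices sequence ixs color)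

-- ===== LEMMAS AND PROOFS =====

-- the per-index piece both programs emit at position i
def pieceF (ixs : List Int) (color : Int) (cs : List Char) (i : Int) : List Char :=
  if i ∈ ixs then hlPiece color (PySem.List.pyGetD cs i ' ') else [PySem.List.pyGetD cs i ' ']

lemma flatten_map_singleton {α β : Type} (g : α → β) (l : List α) :
    (l.map (fun i => [g i])).flatten = l.map g := by
  induction l with
  | nil => rfl
  | cons x t ih => simp [ih]

lemma segNat (cs : List Char) (a b : Nat) (hb : b ≤ cs.length) :
    (List.range (b - a)).map (fun k => cs.getD (a + k) ' ') = (cs.drop a).take (b - a) := by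
  apply List.ext_getElem
  · simp; omega
  · intro i h1 h2
    simp only [List.getElem_map, List.getElem_range, List.getElem_take, List.getElem_drop]
    simp at h1
    rw [List.getD_eq_getElem _ _ (by omega)]

lemma segInt (cs : List Char) (a b : Int) (h0 : 0 ≤ a) (hab : a ≤ b) (hb : b ≤ cs.length) :
    (PySem.List.pyRange a b 1).map (fun i => PySem.List.pyGetD cs i ' ')
      = (cs.drop a.toNat).take (b.toNat - a.toNat) := by
  rw [PySem.List.pyRange_one, List.map_map]
  have hbn : (b - a).toNat = b.toNat - a.toNat := by omega
  rw [hbn, ← segNat cs a.toNat b.toNat (by omega)]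
  apply List.map_congr_left
  intro k hk
  simp only [Function.comp_apply]
  have : a + (k : Int) = ((a.toNat + k : Nat) : Int) := by omega
  rw [this, PySem.List.pyGetD_natCast]

-- a segment with no highlighted index flattens to the corresponding slice
lemma plainSeg (ixs : List Int) (color : Int) (cs : List Char) (a b : Int)
    (h0 : 0 ≤ a) (hab : a ≤ b) (hb : b ≤ cs.length)
    (hno : ∀ i : Int, a ≤ i → i < b → i ∉ ixs) :
    ((PySem.List.pyRange a b 1).map (pieceF ixs color cs)).flatten
      = PySem.List.slice cs (some a) (some b) := by
  have hmapeq : (PySem.List.pyRange a b 1).map (pieceF ixs color cs)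
      = (PySem.List.pyRange a b 1).map (fun i => [PySem.List.pyGetD cs i ' ']) := by
    apply List.map_congr_left
    intro i hi
    rw [PySem.List.mem_pyRange_one] at hi
    unfold pieceF
    rw [if_neg (hno i hi.1 hi.2)]
  rw [hmapeq, flatten_map_singleton, segInt cs a b h0 hab hb,
      PySem.List.slice_toNat cs h0 (by omega)]

-- invariant of B's cursor loop: starting at prev with the remaining sorted targets,
-- the loop emits exactly the pieces of positions prev..len-1
lemma bLoop (ixs : List Int) (color : Int) (cs : List Char) (ts : List Int) :
    ∀ (prev : Int) (parts : List (List Char)),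
    ts.Pairwise (· < ·) →
    (∀ t ∈ ts, prev ≤ t ∧ t < (cs.length : Int)) →
    0 ≤ prev →
    (∀ i : Int, prev ≤ i → i < (cs.length : Int) → (i ∈ ixs ↔ i ∈ ts)) →
    (let st := ts.foldl
        (fun (st : List (List Char) × Int) t =>
          (st.1 ++ [PySem.List.slice cs (some st.2) (some t),
                    hlPiece color (PySem.List.pyGetD cs t ' ')], t + 1))
        (parts, prev)
     (st.1 ++ [PySem.List.slice cs (some st.2) none]).flatten)
    = parts.flatten ++ ((PySem.List.pyRange prev (cs.length : Int) 1).map (pieceF ixs color cs)).flatten := by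
  induction ts with
  | nil =>
    intro prev parts _ _ h0 hmem
    simp only [List.foldl_nil]
    by_cases hpn : prev ≤ (cs.length : Int)
    · have hplain : ((PySem.List.pyRange prev (cs.length : Int) 1).map (pieceF ixs color cs)).flatten
          = PySem.List.slice cs (some prev) (some (cs.length : Int)) := by
        apply plainSeg ixs color cs prev _ h0 hpn (by omega)
        intro i hi1 hi2 hmemi
        exact (List.not_mem_nil (a := i)) ((hmem i hi1 hi2).1 hmemi)
      rw [hplain, PySem.List.slice_from cs h0, PySem.List.slice_toNat cs h0 (by omega),
          List.take_of_length_le (by simp)]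
      simp
    · rw [PySem.List.pyRange_one_eq_nil (by omega)]
      simp [PySem.List.slice_from cs h0, List.drop_eq_nil_of_le (by omega : cs.length ≤ prev.toNat)]
  | cons t ts ih =>
    intro prev parts hpw hbnd h0 hmem
    simp only [List.foldl_cons]
    have hpt : prev ≤ t ∧ t < (cs.length : Int) := hbnd t List.mem_cons_self
    have hpw' := (List.pairwise_cons.mp hpw)
    rw [ih (t + 1) _ hpw'.2
        (fun u hu => ⟨by have := hpw'.1 u hu; omega, (hbnd u (List.mem_cons_of_mem _ hu)).2⟩)
        (by omega)
        (by
          intro i hi1 hi2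
          rw [hmem i (by omega) hi2, List.mem_cons]
          constructor
          · rintro (rfl | h); · omega
            · exact h
          · intro h; exact Or.inr h)]
    have hsplit : PySem.List.pyRange prev (cs.length : Int) 1
        = PySem.List.pyRange prev t 1 ++ [t] ++ PySem.List.pyRange (t + 1) (cs.length : Int) 1 := by
      rw [← PySem.List.pyRange_one_succ_right (h := hpt.1),
          ← PySem.List.pyRange_one_append prev (t + 1) (cs.length : Int) (by omega) (by omega)]
    rw [hsplit]
    have hplain : ((PySem.List.pyRange prev t 1).map (pieceF ixs color cs)).flatten
        = PySem.List.slice cs (some prev) (some t) := by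
      apply plainSeg ixs color cs prev t h0 hpt.1 (by omega)
      intro i hi1 hi2 hmemi
      have := (hmem i hi1 (by omega)).1 hmemi
      rcases List.mem_cons.mp this with rfl | h
      · omega
      · have := hpw'.1 i h; omega
    have ht : pieceF ixs color cs t = hlPiece color (PySem.List.pyGetD cs t ' ') := by
      unfold pieceF
      rw [if_pos ((hmem t hpt.1 hpt.2).2 List.mem_cons_self)]
    simp only [List.map_append, List.flatten_append, List.map_cons, List.map_nil,
      List.flatten_cons, List.flatten_nil, hplain, ht, List.append_assoc, List.append_nil]

-- A emits exactly the piece of each position 0..len-1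
lemma aSide (sequence : String) (ixs : List Int) (color : Int) :
    highlight_indices sequence ixs color
      = String.ofList (((PySem.List.pyRange 0 (sequence.toList.length : Int) 1).map
          (pieceF ixs color sequence.toList)).flatten) := by
  unfold highlight_indices
  have hstep : ∀ (acc : List (List Char)) (iv : Int × Char),
      (if iv.1 ∈ ixs then acc ++ [hlPiece color iv.2] else acc ++ [[iv.2]])
        = acc ++ [if iv.1 ∈ ixs then hlPiece color iv.2 else [iv.2]] := by
    intro acc iv; split <;> rfl
  rw [show (fun (acc : List (List Char)) (iv : Int × Char) =>
        if iv.1 ∈ ixs then acc ++ [hlPiece color iv.2] else acc ++ [[iv.2]])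
      = fun acc iv => acc ++ [if iv.1 ∈ ixs then hlPiece color iv.2 else [iv.2]] from
      funext fun acc => funext fun iv => hstep acc iv]
  rw [PySem.List.foldl_append_singleton_eq_map]
  rw [PySem.List.enumerate_eq_map_pyRange (d := ' '), List.map_map]
  simp only [PySem.List.len_eq, List.nil_append]
  rfl

lemma mem_validTargets (n : Int) (ixs : List Int) (i : Int) :
    i ∈ validTargets n ixs ↔ (i ∈ ixs ∧ 0 ≤ i ∧ i < n) := by
  unfold validTargets
  rw [PySem.List.mem_sorted, PySem.Set.mem_ofList, List.mem_filter]
  simp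

lemma pairwise_validTargets (n : Int) (ixs : List Int) :
    (validTargets n ixs).Pairwise (· < ·) :=
  PySem.List.sorted_ofList_pairwise_lt _

-- B emits the same canonical piece list
lemma bSide (sequence : String) (ixs : List Int) (color : Int) :
    highlight_indices_alt sequence ixs color
      = String.ofList (((PySem.List.pyRange 0 (sequence.toList.length : Int) 1).map
          (pieceF ixs color sequence.toList)).flatten) := by
  unfold highlight_indices_alt
  simp only [PySem.List.len_eq]
  have hmem : ∀ i : Int, i ∈ validTargets (sequence.toList.length : Int) ixs
      ↔ (i ∈ ixs ∧ 0 ≤ i ∧ i < (sequence.toList.length : Int)) :=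
    mem_validTargets _ ixs
  have := bLoop ixs color sequence.toList (validTargets (sequence.toList.length : Int) ixs) 0 []
      (pairwise_validTargets _ ixs)
      (fun t ht => ⟨((hmem t).mp ht).2.1, ((hmem t).mp ht).2.2⟩)
      (le_refl 0)
      (fun i h1 h2 => Iff.intro (fun h => (hmem i).mpr ⟨h, h1, h2⟩)
        (fun h => ((hmem i).mp h).1))
  simp only at this
  rw [this]
  simp

-- ===== VERDICT (by name: the statement is the Claim_ definition above) =====
theorem highlight_indices_spec : Claim_equal_highlight_indices := by
  intro sequence ixs color _
  unfold Spec_highlight_indices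
  rw [aSide, bSide]
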